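-- pv_equiv track=rewrite | github.com/Ambossmann/AdventOfCode | 2023/13/mirrors.py | get_possible_mirrors
-- ===== SOURCE A (Python) =====
-- def get_possible_mirrors(pattern):
--     mirrors = [[], []]
--     for i in range(len(pattern) - 1):
--         if pattern[i] == pattern[i+1]:
--             mirrors[0].append(i+1)
--     for i in range(len(pattern[0]) - 1):
--         if all(pattern[j][i] == pattern[j][i+1] for j in range(len(pattern))):
--             mirrors[1].append(i+1)
--     return mirrors
-- ===== SOURCE B (Python) =====
-- def _eq_adjacent(seq):
--     return {i for i in range(1, len(seq)) if seq[i - 1] == seq[i]}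
--
--
-- def get_possible_mirrors(pattern):
--     cols = set(range(1, len(pattern[0])))
--     for row in pattern:
--         cols &= _eq_adjacent(row)
--     return [sorted(_eq_adjacent(pattern)), sorted(cols)]
-- ===== Notes on version B (the rewrite author's own statement) =====
-- stated objective: alternative
-- what changed: Column mirrors are found by a row-major pass that intersects, over the rows, each row's set of adjacent-equal positions (starting from all candidate columns) and sorts the survivors, replacing A's column-major loop with a nested all(...) over per-cell row indexing; rows use the same adjacent-equal set helper.
import Mathlib
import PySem

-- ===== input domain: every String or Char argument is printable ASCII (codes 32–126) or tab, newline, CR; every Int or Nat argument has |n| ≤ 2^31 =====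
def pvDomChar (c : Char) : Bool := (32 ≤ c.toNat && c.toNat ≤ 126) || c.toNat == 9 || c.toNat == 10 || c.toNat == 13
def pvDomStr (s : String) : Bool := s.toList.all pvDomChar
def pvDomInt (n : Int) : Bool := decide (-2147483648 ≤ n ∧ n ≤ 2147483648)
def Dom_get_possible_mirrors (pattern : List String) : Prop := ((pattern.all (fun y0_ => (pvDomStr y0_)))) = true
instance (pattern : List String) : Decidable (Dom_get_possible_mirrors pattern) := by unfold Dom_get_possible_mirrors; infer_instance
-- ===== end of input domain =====

-- B replaces A's column-major nested all(...) scan with a row-major pass that intersects, over the rows,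
-- each row's set of adjacent-equal positions (set intersection), sorting the surviving candidates;
-- same cost, a different traversal order and data structure.

-- ===== PORT A =====
-- pattern[j][i] == pattern[j][i+1]; an out-of-range access is Python's IndexError (excluded by Pre_),
-- here the match's catch-all arm (the value there is never claimed).
def pvCharOk (row : List Char) (i : Nat) : Bool :=
  match row[i]?, row[i + 1]? with
  | some a, some b => a == b
  | _, _ => false

def get_possible_mirrors (pattern : List String) : List (List Int) :=
  let m0 := (List.range (pattern.length - 1)).foldl
    (fun acc i => if pattern.getD i "" == pattern.getD (i + 1) "" then acc ++ [((i : Int) + 1)] else acc) []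
  -- pattern[0]: the default "" is only reached on the empty pattern, which Pre_ excludes (IndexError)
  let m1 := (List.range ((pattern.getD 0 "").toList.length - 1)).foldl
    (fun acc i => if pattern.all (fun row => pvCharOk row.toList i) then acc ++ [((i : Int) + 1)] else acc) []
  [m0, m1]

-- ===== PORT B =====
-- {i for i in range(1, len(seq)) if seq[i - 1] == seq[i]}
-- (indices i-1, i are always in range inside the comprehension; pyGetD's default is never read)
def pvEqAdjacent {α : Type} [BEq α] (seq : List α) (d : α) : PySem.Set Int :=
  PySem.Set.ofList ((PySem.List.pyRange 1 (PySem.List.len seq)).filter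
    (fun i => PySem.List.pyGetD seq (i - 1) d == PySem.List.pyGetD seq i d))

def get_possible_mirrors_alt (pattern : List String) : List (List Int) :=
  -- pattern[0]: default "" only reached on the empty pattern, excluded by Pre_ (IndexError)
  let cols0 : PySem.Set Int :=
    PySem.Set.ofList (PySem.List.pyRange 1 (PySem.List.len (pattern.getD 0 "").toList))
  let cols := pattern.foldl (fun s row => PySem.Set.inter s (pvEqAdjacent row.toList ' ')) cols0
  [PySem.List.sorted (pvEqAdjacent pattern "") (fun x => x),
   PySem.List.sorted cols (fun x => x)]

-- ===== PRECONDITION & SPEC =====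
-- Pre_ is exactly the set of inputs on which the Python A returns: A raises IndexError on the empty
-- pattern (it evaluates pattern[0]), and on a ragged pattern it raises IndexError at any column i whose
-- short-circuiting all(...) generator reaches a row shorter than i+2 — the second clause says no column
-- scan ever reaches such a row.  Ragged patterns on which A does return are INSIDE Pre_.
def Pre_get_possible_mirrors (pattern : List String) : Prop :=
  pattern ≠ [] ∧
  ∀ i < (pattern.headD "").toList.length, ∀ j < pattern.length,
    i + 1 < (pattern.headD "").toList.length →
    (∀ j' < j, i + 1 < (pattern.getD j' "").toList.length ∧
        (pattern.getD j' "").toList.getD i ' ' = (pattern.getD j' "").toList.getD (i + 1) ' ') →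
    i + 1 < (pattern.getD j "").toList.length
instance (pattern : List String) : Decidable (Pre_get_possible_mirrors pattern) := by
  unfold Pre_get_possible_mirrors; infer_instance
def pvWitness_get_possible_mirrors : List String := ["#.", "#.", "ab"]

def Spec_get_possible_mirrors (pattern : List String) (out : List (List Int)) : Prop := out = get_possible_mirrors_alt pattern
instance (pattern : List String) (out : List (List Int)) : Decidable (Spec_get_possible_mirrors pattern out) := by unfold Spec_get_possible_mirrors; infer_instance

-- ===== CLAIM (what is proved, stated in full; the proofs are below) =====
def Claim_equal_get_possible_mirrors : Prop := ∀ (pattern : List String), Dom_get_possible_mirrors pattern → Pre_get_possible_mirrors pattern → Spec_get_possible_mirrors pattern (get_possible_mirrors pattern)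

-- ===== LEMMAS AND PROOFS =====

-- A's per-cell test succeeds exactly on an in-range equal pair …
theorem pvCharOk_iff (row : List Char) (i : Nat) (h : i + 1 < row.length) :
    pvCharOk row i = true ↔ row.getD i ' ' = row.getD (i + 1) ' ' := by
  have h1 : i < row.length := by omega
  unfold pvCharOk
  rw [List.getElem?_eq_getElem h1, List.getElem?_eq_getElem h,
    List.getD_eq_getElem _ _ h1, List.getD_eq_getElem _ _ h]
  simp

-- … and fails on any row too short for the pair (where Python A would raise, or has already stopped)
theorem pvCharOk_false_of_short (row : List Char) (i : Nat) (h : row.length ≤ i + 1) :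
    pvCharOk row i = false := by
  have : row[i + 1]? = none := by
    rw [List.getElem?_eq_none_iff]; omega
  unfold pvCharOk
  rw [this]
  cases row[i]? <;> rfl

-- a filter of range(1, n) is the corresponding filter of range(n-1), shifted by one
theorem pv_pyRange_one_filter (n : Nat) (p : Int → Bool) :
    (PySem.List.pyRange 1 (n : Int)).filter p
      = ((List.range (n - 1)).filter (fun k : Nat => p ((k : Int) + 1))).map (fun k : Nat => (k : Int) + 1) := by
  rw [PySem.List.pyRange_one, List.filter_map]
  have hn : ((n : Int) - 1).toNat = n - 1 := by omega
  rw [hn]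
  simp only [Function.comp_def, show ∀ k : Nat, (1 : Int) + (k : Int) = (k : Int) + 1
    from fun k => by ring]

-- a filter of range(1, n) is strictly increasing, hence its own set and its own sort
theorem pv_filter_pairwise_lt (n : Int) (p : Int → Bool) :
    ((PySem.List.pyRange 1 n).filter p).Pairwise (· < ·) :=
  (PySem.List.pairwise_lt_pyRange_one 1 n).filter p

theorem pv_ofList_filter (n : Int) (p : Int → Bool) :
    PySem.Set.ofList ((PySem.List.pyRange 1 n).filter p) = (PySem.List.pyRange 1 n).filter p :=
  PySem.Set.ofList_eq_self_of_nodup _ ((pv_filter_pairwise_lt n p).imp ne_of_lt)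

theorem pv_sorted_filter (n : Int) (p : Int → Bool) :
    PySem.List.sorted ((PySem.List.pyRange 1 n).filter p) (fun x => x)
      = (PySem.List.pyRange 1 n).filter p :=
  PySem.List.sorted_eq_self_of_pairwise _ _ ((pv_filter_pairwise_lt n p).imp le_of_lt)

-- the shifted-range filter underlying B's adjacent-equal set, with a Nat-indexed predicate
theorem pv_filter_shift {α : Type} [BEq α] [LawfulBEq α] (xs : List α) (d : α) :
    (PySem.List.pyRange 1 (PySem.List.len xs)).filter
        (fun i => PySem.List.pyGetD xs (i - 1) d == PySem.List.pyGetD xs i d)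
      = ((List.range (xs.length - 1)).filter
          (fun k => xs.getD k d == xs.getD (k + 1) d)).map (fun k : Nat => (k : Int) + 1) := by
  rw [show PySem.List.len xs = ((xs.length : Nat) : Int) from rfl, pv_pyRange_one_filter]
  congr 1
  apply List.filter_congr; intro k _
  have h1 : ((k : Int) + 1) - 1 = ((k : Nat) : Int) := by omega
  have h2 : ((k : Int) + 1) = (((k + 1 : Nat)) : Int) := by omega
  rw [h1, h2, PySem.List.pyGetD_natCast, PySem.List.pyGetD_natCast]

theorem pv_eqAdjacent_eq {α : Type} [BEq α] [LawfulBEq α] (xs : List α) (d : α) :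
    pvEqAdjacent xs d
      = ((List.range (xs.length - 1)).filter
          (fun k => xs.getD k d == xs.getD (k + 1) d)).map (fun k : Nat => (k : Int) + 1) := by
  unfold pvEqAdjacent; rw [pv_ofList_filter, pv_filter_shift]

-- a fold of set intersections is one filter by membership in every operand
theorem pv_foldl_inter {β : Type} (rows : List β) (g : β → PySem.Set Int) (s0 : List Int) :
    rows.foldl (fun s row => PySem.Set.inter s (g row)) s0
      = s0.filter (fun m => rows.all (fun row => (g row).contains m)) := by
  induction rows generalizing s0 with
  | nil => simp
  | cons r t ih =>
    show t.foldl _ (PySem.Set.inter s0 (g r)) = _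
    rw [ih, show PySem.Set.inter s0 (g r) = s0.filter (fun m => (g r).contains m) from rfl,
      List.filter_filter]
    apply List.filter_congr; intro m _; simp [Bool.and_comm]

-- membership of k+1 in a row's adjacent-equal set is exactly A's per-cell test at k
theorem pv_contains_eqAdjacent (row : List Char) (k : Nat) :
    (pvEqAdjacent row ' ').contains ((k : Int) + 1) = pvCharOk row k := by
  rw [pv_eqAdjacent_eq]
  rw [Bool.eq_iff_iff, PySem.Set.contains_iff]
  simp only [List.mem_map, List.mem_filter, List.mem_range]
  constructor
  · rintro ⟨k', ⟨hk', heq⟩, hcast⟩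
    have hkk : k' = k := by omega
    rw [← hkk]
    exact (pvCharOk_iff row k' (by omega)).mpr (by simpa using heq)
  · intro h
    by_cases hlen : k + 1 < row.length
    · exact ⟨k, ⟨by omega, by simpa using (pvCharOk_iff row k hlen).mp h⟩, rfl⟩
    · rw [pvCharOk_false_of_short row k (by omega)] at h; cases h

-- main equality of the two ports, on every input
theorem pv_ports_eq (pattern : List String) :
    get_possible_mirrors pattern = get_possible_mirrors_alt pattern := by
  simp only [get_possible_mirrors, get_possible_mirrors_alt]
  rw [PySem.List.foldl_append_if, PySem.List.foldl_append_if, List.nil_append, List.nil_append]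
  congr 1
  · -- rows: B sorts its own already-increasing candidate set
    rw [show pvEqAdjacent pattern "" = PySem.Set.ofList ((PySem.List.pyRange 1 (PySem.List.len pattern)).filter
          (fun i => PySem.List.pyGetD pattern (i - 1) "" == PySem.List.pyGetD pattern i "")) from rfl,
      pv_ofList_filter, pv_sorted_filter, pv_filter_shift]
  · -- columns: the fold of intersections is a single filter of the candidate range
    congr 1
    rw [pv_foldl_inter,
      PySem.Set.ofList_eq_self_of_nodup _ (PySem.List.nodup_pyRange_one 1 _),
      pv_sorted_filter,
      show PySem.List.len (pattern.getD 0 "").toList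
        = (((pattern.getD 0 "").toList.length : Nat) : Int) from rfl,
      pv_pyRange_one_filter]
    congr 1
    apply List.filter_congr; intro k _
    have : ∀ row : String, (pvEqAdjacent row.toList ' ').contains ((k : Int) + 1) = pvCharOk row.toList k :=
      fun row => pv_contains_eqAdjacent row.toList k
    simp only [this]

-- ===== VERDICT (by name: the statement is the Claim_ definition above) =====
theorem get_possible_mirrors_spec : Claim_equal_get_possible_mirrors := by
  intro pattern _ _
  unfold Spec_get_possible_mirrors
  exact pv_ports_eq pattern
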